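-- pv_equiv track=rewrite | github.com/kaiserbergin/rpbot | dice.py | getHits
-- ===== SOURCE A (Python) =====
-- def getHits(dice: [int]) -> int:
--     hits = 0
--     tempDice = sorted(dice)
--     lastIndex = len(tempDice)
--     index = 0
--     while index < lastIndex:
--         if tempDice[index] < 0 and tempDice[-index - 1] > 0:
--             lastIndex = lastIndex - 1
--         else:
--             hits += tempDice[index]
--         index += 1
--     return hits
-- ===== SOURCE B (Python) =====
-- def getHits(dice: [int]) -> int:
--     neg = sum(1 for d in dice if d < 0)
--     pos = sum(1 for d in dice if d > 0)
--     k = min(neg, pos)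
--     s = sorted(dice)
--     return sum(s[k:len(s) - k])
-- ===== Notes on version B (the rewrite author's own statement) =====
-- stated objective: simpler
-- what changed: Replaces A's while loop with a mutating end index and negative indexing by counting negatives and positives once, taking k = min(neg, pos), and summing the single slice sorted(dice)[k:n-k].
import Mathlib
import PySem

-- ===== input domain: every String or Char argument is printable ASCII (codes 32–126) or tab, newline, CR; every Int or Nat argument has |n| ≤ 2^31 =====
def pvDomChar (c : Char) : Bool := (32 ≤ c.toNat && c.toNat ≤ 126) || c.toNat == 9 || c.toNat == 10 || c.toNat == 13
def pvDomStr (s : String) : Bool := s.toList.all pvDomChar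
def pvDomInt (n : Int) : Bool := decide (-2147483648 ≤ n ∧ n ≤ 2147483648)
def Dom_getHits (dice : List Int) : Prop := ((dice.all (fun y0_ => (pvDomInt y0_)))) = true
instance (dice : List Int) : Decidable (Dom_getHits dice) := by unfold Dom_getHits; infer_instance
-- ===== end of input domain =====

-- B replaces A's index-shifting cancellation loop by counting negatives/positives and summing
-- one slice of the sorted list (objective: simpler; same O(n log n) cost).

-- ===== PORT A =====
-- A's while loop; tempDice[index] and tempDice[-index-1] are always in range while the loop
-- runs (0 ≤ index < lastIndex ≤ len), so pyGetD with default 0 is exact here.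
def getHitsLoop (t : List Int) (hits index lastIndex : Int) : Int :=
  if h : index < lastIndex then
    if PySem.List.pyGetD t index 0 < 0 ∧ 0 < PySem.List.pyGetD t (-index - 1) 0 then
      getHitsLoop t hits (index + 1) (lastIndex - 1)
    else
      getHitsLoop t (hits + PySem.List.pyGetD t index 0) (index + 1) lastIndex
  else hits
termination_by (lastIndex - index).toNat
decreasing_by all_goals omega

def getHits (dice : List Int) : Int :=
  let tempDice := PySem.List.sorted dice (fun x => x)
  getHitsLoop tempDice 0 0 (tempDice.length : Int)

-- ===== PORT B =====
def getHits_alt (dice : List Int) : Int :=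
  let neg : Int := (dice.countP (fun d => decide (d < 0)) : Int)
  let pos : Int := (dice.countP (fun d => decide (0 < d)) : Int)
  let k : Int := min neg pos
  let s := PySem.List.sorted dice (fun x => x)
  (PySem.List.slice s (some k) (some ((s.length : Int) - k))).sum

-- ===== PRECONDITION & SPEC =====
def Spec_getHits (dice : List Int) (out : Int) : Prop := out = getHits_alt dice
instance (dice : List Int) (out : Int) : Decidable (Spec_getHits dice out) := by unfold Spec_getHits; infer_instance

-- ===== CLAIM (what is proved, stated in full; the proofs are below) =====
def Claim_equal_getHits : Prop := ∀ (dice : List Int), Dom_getHits dice → Spec_getHits dice (getHits dice)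

-- ===== LEMMAS AND PROOFS =====

-- counts on a list
def negC (t : List Int) : Nat := t.countP (fun d => decide (d < 0))
def posC (t : List Int) : Nat := t.countP (fun d => decide (0 < d))
def kC (t : List Int) : Nat := min (negC t) (posC t)

-- in a sorted list the negatives are exactly the first negC elements
lemma negPrefix (t : List Int) (h : t.Pairwise (· ≤ ·)) :
    (∀ x ∈ t.take (negC t), x < 0) ∧ (∀ x ∈ t.drop (negC t), 0 ≤ x) := by
  induction t with
  | nil => simp
  | cons a t ih =>
    rw [List.pairwise_cons] at h
    obtain ⟨hle, hp⟩ := h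
    obtain ⟨ih1, ih2⟩ := ih hp
    by_cases ha : a < 0
    · have : negC (a :: t) = negC t + 1 := by
        simp [negC, List.countP_cons, ha]
      rw [this]
      constructor
      · intro x hx
        rw [List.take_succ_cons, List.mem_cons] at hx
        rcases hx with rfl | hx
        · exact ha
        · exact ih1 x hx
      · intro x hx
        rw [List.drop_succ_cons] at hx
        exact ih2 x hx
    · have hz : negC t = 0 := by
        rw [negC, List.countP_eq_zero]
        intro x hx
        simp only [decide_eq_true_eq]
        exact fun hlt => ha (lt_of_le_of_lt (hle x hx) hlt)
      have hc0 : negC (a :: t) = 0 := by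
        rw [negC, List.countP_cons]
        rw [negC] at hz
        simp [ha, hz]
      rw [hc0]
      constructor
      · intro x hx; simp at hx
      · intro x hx
        simp only [List.drop_zero, List.mem_cons] at hx
        rcases hx with rfl | hx
        · omega
        · have := hle x hx; omega

-- in a sorted list the positives are exactly the last posC elements
lemma posSuffix (t : List Int) (h : t.Pairwise (· ≤ ·)) :
    (∀ x ∈ t.take (t.length - posC t), x ≤ 0) ∧ (∀ x ∈ t.drop (t.length - posC t), 0 < x) := by
  induction t with
  | nil => simp
  | cons a t ih =>
    rw [List.pairwise_cons] at h
    obtain ⟨hle, hp⟩ := h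
    obtain ⟨ih1, ih2⟩ := ih hp
    by_cases ha : 0 < a
    · have hall : posC t = t.length := by
        rw [posC, List.countP_eq_length]
        intro x hx
        simp only [decide_eq_true_eq]
        exact lt_of_lt_of_le ha (hle x hx)
      have hc1 : posC (a :: t) = posC t + 1 := by
        rw [posC, List.countP_cons]
        simp [ha, posC]
      have hz0 : (a :: t).length - posC (a :: t) = 0 := by
        rw [hc1, hall]
        simp
      rw [hz0]
      constructor
      · intro x hx; simp at hx
      · intro x hx
        simp only [List.drop_zero, List.mem_cons] at hx
        rcases hx with rfl | hx
        · exact ha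
        · exact lt_of_lt_of_le ha (hle x hx)
    · have hc : posC (a :: t) = posC t := by
        simp [posC, List.countP_cons, ha]
      have hple : posC t ≤ t.length := List.countP_le_length
      have : (a :: t).length - posC (a :: t) = (t.length - posC t) + 1 := by
        rw [hc]; simp only [List.length_cons]; omega
      rw [this]
      constructor
      · intro x hx
        rw [List.take_succ_cons, List.mem_cons] at hx
        rcases hx with rfl | hx
        · omega
        · exact ih1 x hx
      · intro x hx
        rw [List.drop_succ_cons] at hx
        exact ih2 x hx

lemma count_disjoint (t : List Int) : negC t + posC t ≤ t.length := by
  have h1 : posC t ≤ t.countP (fun d => decide ¬(decide (d < 0)) = true) := by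
    apply List.countP_mono_left
    intro x _ hx
    simp only [decide_eq_true_eq] at *
    omega
  have h2 := List.length_eq_countP_add_countP (fun d => decide (d < 0)) (l := t)
  unfold negC posC at *
  omega

-- phase 2: once the cancel condition fails for every remaining index, the loop adds t[i..L)
lemma loop_add (t : List Int) : ∀ (d : Nat) (hits : Int) (i L : Nat),
    d = L - i → i ≤ L → L ≤ t.length →
    (∀ j : Nat, i ≤ j → j < L →
      ¬(PySem.List.pyGetD t (j : Int) 0 < 0 ∧ 0 < PySem.List.pyGetD t (-(j : Int) - 1) 0)) →
    getHitsLoop t hits (i : Int) (L : Int) = hits + ((t.take L).drop i).sum := by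
  intro d
  induction d with
  | zero =>
    intro hits i L hd hil hL hcond
    have : i = L := by omega
    subst this
    rw [getHitsLoop]
    simp
  | succ d ih =>
    intro hits i L hd hil hL hcond
    have hiL : i < L := by omega
    rw [getHitsLoop]
    rw [dif_pos (by exact_mod_cast hiL)]
    rw [if_neg (hcond i le_rfl hiL)]
    have hcast : (i : Int) + 1 = ((i + 1 : Nat) : Int) := by push_cast; ring
    rw [hcast]
    rw [ih (hits + PySem.List.pyGetD t (i : Int) 0) (i + 1) L (by omega) (by omega) hL
      (fun j hj hjL => hcond j (by omega) hjL)]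
    have hit : i < (t.take L).length := by simp; omega
    rw [List.drop_eq_getElem_cons hit]
    have : (t.take L)[i] = t[i]'(by omega) := List.getElem_take
    rw [List.sum_cons, this]
    have : PySem.List.pyGetD t (i : Int) 0 = t[i]'(by omega) := by
      rw [PySem.List.pyGetD_eq_getElem t 0 (by omega) (by exact_mod_cast (by omega : i < t.length))]
      simp
    rw [this]
    ring

-- phase 1: the first kC steps cancel; then phase 2 sums the middle slice
lemma loop_cancel (t : List Int) (hp : t.Pairwise (· ≤ ·)) :
    ∀ (d i : Nat), i ≤ kC t → d = kC t - i →
    getHitsLoop t 0 (i : Int) ((t.length : Int) - (i : Int)) =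
      ((t.take (t.length - kC t)).drop (kC t)).sum := by
  have hnp := count_disjoint t
  have hneg := negPrefix t hp
  have hpos := posSuffix t hp
  have hkn : kC t ≤ negC t := Nat.min_le_left _ _
  have hkp : kC t ≤ posC t := Nat.min_le_right _ _
  have hkl : 2 * kC t ≤ t.length := by unfold kC at *; omega
  -- index facts
  have hgetlt : ∀ (j : Nat), j < negC t → PySem.List.pyGetD t (j : Int) 0 < 0 := by
    intro j hj
    have hjl : j < t.length := by
      have := List.countP_le_length (p := fun d => decide (d < 0)) (l := t)
      unfold negC at hj; omega
    rw [PySem.List.pyGetD_eq_getElem t 0 (by omega) (by exact_mod_cast hjl)]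
    simp only [Int.toNat_natCast]
    apply hneg.1
    have hjt : j < (t.take (negC t)).length := by simp; omega
    have : (t.take (negC t))[j] = t[j]'hjl := List.getElem_take
    rw [← this]
    exact List.getElem_mem _
  have hgetge : ∀ (j : Nat), negC t ≤ j → j < t.length → 0 ≤ PySem.List.pyGetD t (j : Int) 0 := by
    intro j hj hjl
    rw [PySem.List.pyGetD_eq_getElem t 0 (by omega) (by exact_mod_cast hjl)]
    simp only [Int.toNat_natCast]
    apply hneg.2
    have hjt : j - negC t < (t.drop (negC t)).length := by simp; omega
    have : (t.drop (negC t))[j - negC t] = t[negC t + (j - negC t)]'(by simp at hjt ⊢; omega) :=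
      List.getElem_drop
    have heq : t[j]'hjl = (t.drop (negC t))[j - negC t] := by
      rw [this]; congr 1; omega
    rw [heq]
    exact List.getElem_mem _
  have hgetpos : ∀ (j : Nat), t.length - posC t ≤ j → ∀ (hjl : j < t.length), 0 < t[j]'hjl := by
    intro j hj hjl
    apply hpos.2
    have hjt : j - (t.length - posC t) < (t.drop (t.length - posC t)).length := by simp; omega
    have : (t.drop (t.length - posC t))[j - (t.length - posC t)]
        = t[(t.length - posC t) + (j - (t.length - posC t))]'(by simp at hjt ⊢; omega) :=
      List.getElem_drop
    have heq : t[j]'hjl = (t.drop (t.length - posC t))[j - (t.length - posC t)] := by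
      rw [this]; congr 1; omega
    rw [heq]
    exact List.getElem_mem _
  have hgetle : ∀ (j : Nat) (hj : j < t.length - posC t), t[j]'(by omega) ≤ 0 := by
    intro j hj
    apply hpos.1
    have hjt : j < (t.take (t.length - posC t)).length := by simp; omega
    have : (t.take (t.length - posC t))[j] = t[j]'(by omega) := List.getElem_take
    rw [← this]
    exact List.getElem_mem _
  -- negative-index access: t[-(j+1)] = t[len - (j+1)]
  have hgetneg : ∀ (j : Nat) (hjl : j < t.length),
      PySem.List.pyGetD t (-(j : Int) - 1) 0 = t[t.length - (j + 1)]'(by omega) := by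
    intro j hjl
    have : (-(j : Int) - 1) = -((j + 1 : Nat) : Int) := by push_cast; ring
    rw [this, PySem.List.pyGetD_neg_natCast t (j + 1) 0 (by omega) (by omega)]
  intro d
  induction d with
  | zero =>
    intro i hik hd
    have : i = kC t := by omega
    subst this
    have hLcast : (t.length : Int) - (kC t : Int) = ((t.length - kC t : Nat) : Int) := by
      push_cast [Nat.cast_sub (by omega : kC t ≤ t.length)]; ring
    rw [hLcast]
    rw [loop_add t (t.length - kC t - kC t) 0 (kC t) (t.length - kC t) (by omega) (by omega)
      (by omega) ?_]
    · ring
    · intro j hj hjL hcontra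
      obtain ⟨h1, h2⟩ := hcontra
      have hjl : j < t.length := by omega
      rcases Nat.le_total (negC t) (posC t) with hmin | hmin
      · -- kC = negC : t[j] is nonnegative for j ≥ kC
        have hE : kC t = negC t := by unfold kC; omega
        have hge := hgetge j (by omega) hjl
        omega
      · -- kC = posC : the mirrored element is nonpositive
        have hkc : kC t = posC t := by unfold kC; omega
        rw [hgetneg j hjl] at h2
        have hle' := hgetle (t.length - (j + 1)) (by omega)
        omega
  | succ d ih =>
    intro i hik hd
    have hik' : i < kC t := by omega
    rw [getHitsLoop]
    rw [dif_pos (by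
      have : 2 * i < t.length := by omega
      omega)]
    rw [if_pos ?_]
    · have h1 : (i : Int) + 1 = ((i + 1 : Nat) : Int) := by push_cast; ring
      have h2 : (t.length : Int) - (i : Int) - 1 = (t.length : Int) - ((i + 1 : Nat) : Int) := by
        push_cast; ring
      rw [h1, h2]
      exact ih (i + 1) (by omega) (by omega)
    · constructor
      · exact hgetlt i (by omega)
      · rw [hgetneg i (by omega)]
        exact hgetpos (t.length - (i + 1)) (by omega) (by omega)

-- ===== VERDICT (by name: the statement is the Claim_ definition above) =====
theorem getHits_spec : Claim_equal_getHits := by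
  intro dice _
  unfold Spec_getHits getHits getHits_alt
  set t := PySem.List.sorted dice (fun x => x) with ht
  have hperm : t.Perm dice := PySem.List.sorted_perm dice (fun x => x) false
  have hp : t.Pairwise (· ≤ ·) := PySem.List.sorted_pairwise dice (fun x => x)
  have hcn : dice.countP (fun d => decide (d < 0)) = negC t := (hperm.countP_eq _).symm
  have hcp : dice.countP (fun d => decide (0 < d)) = posC t := (hperm.countP_eq _).symm
  have hkl : kC t ≤ t.length := by
    have := count_disjoint t
    unfold kC at *; omega
  simp only [hcn, hcp]
  have hmin : (min ((negC t : Int)) ((posC t : Int))) = ((kC t : Nat) : Int) := by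
    unfold kC; push_cast; rfl
  rw [hmin]
  have hb : (t.length : Int) - ((kC t : Nat) : Int) = ((t.length - kC t : Nat) : Int) := by
    push_cast [Nat.cast_sub hkl]; ring
  rw [hb, PySem.List.slice_natCast]
  have := loop_cancel t hp (kC t) 0 (by omega) (by omega)
  simp only [Nat.cast_zero, sub_zero] at this
  rw [this]
  congr 1
  rw [List.drop_take, List.take_drop]
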